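-- pv_equiv track=rewrite | github.com/dy2009/tts_factory | data_process_youtobe/tool_0009_combine_big_wav24k.py | get_spk_id2_from_id
-- ===== SOURCE A (Python) =====
-- def get_spk_id2_from_id(in_id):
--     #
--     out_str = ""
--     #
--     skip_num = 0
--     #
--     for i in range(len(in_id)):
--         cur_char = in_id[i]
--         #
--         cur_char_lower = in_id[i].lower()
--         #
--         if(cur_char_lower >= "a" and cur_char_lower <= "z"):
--             out_str += cur_char
--         else:
--             if(skip_num == 0):
--                 out_str += cur_char
--             #
--             skip_num += 1
--             #
--         #
--         if(skip_num >= 2):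
--             return out_str
--     #
--     #
--     return out_str
-- ===== SOURCE B (Python) =====
-- def _is_sep(c):
--     cl = c.lower()
--     return not ('a' <= cl <= 'z')
--
-- def get_spk_id2_from_id(in_id):
--     seps = [i for i, c in enumerate(in_id) if _is_sep(c)]
--     if len(seps) >= 2:
--         return in_id[:seps[1]]
--     return in_id
-- ===== Notes on version B (the rewrite author's own statement) =====
-- stated objective: simpler
-- what changed: B replaces A's character-accumulating loop with skip counter by a boundary computation: it builds the list of non-letter indices once and slices the string just before the second one (or returns it whole).
import Mathlib
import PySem

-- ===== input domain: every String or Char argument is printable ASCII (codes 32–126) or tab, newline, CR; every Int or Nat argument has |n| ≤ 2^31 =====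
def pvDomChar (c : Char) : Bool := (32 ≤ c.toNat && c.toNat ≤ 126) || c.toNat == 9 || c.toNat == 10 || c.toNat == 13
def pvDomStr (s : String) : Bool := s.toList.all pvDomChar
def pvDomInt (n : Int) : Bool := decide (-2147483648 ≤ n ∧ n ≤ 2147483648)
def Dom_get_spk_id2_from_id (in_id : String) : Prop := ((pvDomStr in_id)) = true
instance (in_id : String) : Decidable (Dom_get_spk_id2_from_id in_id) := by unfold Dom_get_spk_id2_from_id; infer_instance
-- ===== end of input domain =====

-- B computes the cut point (the second non-letter index, via an explicit separator-index list)
-- and slices, instead of A's accumulate-and-skip-count loop; objective: simpler.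


-- ===== PORT A =====
-- the for-loop with early return, state = (out_str, skip_num)
def pvLoopA : List Char → String → Int → String
  | [], out, _ => out
  | c :: cs, out, skip =>
    let cl := PySem.Chars.lowerChar c
    if 'a' ≤ cl ∧ cl ≤ 'z' then
      let out' := out.push c
      if 2 ≤ skip then out' else pvLoopA cs out' skip
    else
      let out' := if skip == 0 then out.push c else out
      let skip' := skip + 1
      if 2 ≤ skip' then out' else pvLoopA cs out' skip'

def get_spk_id2_from_id (in_id : String) : String := pvLoopA in_id.toList "" 0

-- ===== PORT B =====
def pvIsSep (c : Char) : Bool :=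
  !(decide ('a' ≤ PySem.Chars.lowerChar c) && decide (PySem.Chars.lowerChar c ≤ 'z'))

def get_spk_id2_from_id_alt (in_id : String) : String :=
  let seps := ((PySem.List.enumerate in_id.toList).filter (fun p => pvIsSep p.2)).map Prod.fst
  match seps with
  | _ :: i :: _ => String.ofList (PySem.List.slice in_id.toList none (some i))
  | _ => in_id

-- ===== PRECONDITION & SPEC =====
def Spec_get_spk_id2_from_id (in_id : String) (out : String) : Prop := out = get_spk_id2_from_id_alt in_id
instance (in_id : String) (out : String) : Decidable (Spec_get_spk_id2_from_id in_id out) := by unfold Spec_get_spk_id2_from_id; infer_instance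

-- ===== CLAIM (what is proved, stated in full; the proofs are below) =====
def Claim_equal_get_spk_id2_from_id : Prop := ∀ (in_id : String), Dom_get_spk_id2_from_id in_id → Spec_get_spk_id2_from_id in_id (get_spk_id2_from_id in_id)

-- ===== LEMMAS AND PROOFS =====

-- characterisation: prefix up to (excluding) the first / second separator
def pvF1 : List Char → List Char
  | [] => []
  | c :: cs => if pvIsSep c then [] else c :: pvF1 cs

def pvF2 : List Char → List Char
  | [] => []
  | c :: cs => if pvIsSep c then c :: pvF1 cs else c :: pvF2 cs

theorem pvIsSep_false {c : Char} (h : 'a' ≤ PySem.Chars.lowerChar c ∧ PySem.Chars.lowerChar c ≤ 'z') :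
    pvIsSep c = false := by simp [pvIsSep, h.1, h.2]

theorem pvIsSep_true {c : Char} (h : ¬('a' ≤ PySem.Chars.lowerChar c ∧ PySem.Chars.lowerChar c ≤ 'z')) :
    pvIsSep c = true := by
  simp [pvIsSep]
  rcases not_and_or.mp h with h' | h'
  · exact Or.inl (not_le.mp h')
  · exact Or.inr (not_le.mp h')

theorem pvLoopA_one (cs : List Char) (out : String) :
    (pvLoopA cs out 1).toList = out.toList ++ pvF1 cs := by
  induction cs generalizing out with
  | nil => simp [pvLoopA, pvF1]
  | cons c cs ih =>
    by_cases h : 'a' ≤ PySem.Chars.lowerChar c ∧ PySem.Chars.lowerChar c ≤ 'z'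
    · simp [pvLoopA, h, pvF1, pvIsSep_false h, ih, String.toList_push]
    · simp [pvLoopA, h, pvF1, pvIsSep_true h]

theorem pvLoopA_zero (cs : List Char) (out : String) :
    (pvLoopA cs out 0).toList = out.toList ++ pvF2 cs := by
  induction cs generalizing out with
  | nil => simp [pvLoopA, pvF2]
  | cons c cs ih =>
    by_cases h : 'a' ≤ PySem.Chars.lowerChar c ∧ PySem.Chars.lowerChar c ≤ 'z'
    · simp [pvLoopA, h, pvF2, pvIsSep_false h, ih, String.toList_push]
    · simp [pvLoopA, h, pvF2, pvIsSep_true h, pvLoopA_one, String.toList_push]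

-- separator indices as naturals
def pvIdxs : List Char → List Nat
  | [] => []
  | c :: cs =>
    if pvIsSep c then 0 :: (pvIdxs cs).map (· + 1) else (pvIdxs cs).map (· + 1)

theorem pvEnumerate_filter (cs : List Char) (s : Int) :
    (((PySem.List.enumerate cs s).filter (fun p => pvIsSep p.2)).map Prod.fst)
      = (pvIdxs cs).map (fun n : Nat => s + (n : Int)) := by
  induction cs generalizing s with
  | nil => simp [PySem.List.enumerate_nil, pvIdxs]
  | cons c cs ih =>
    have hmap : ((pvIdxs cs).map (· + 1)).map (fun n : Nat => s + (n : Int))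
        = (pvIdxs cs).map (fun n : Nat => (s + 1) + (n : Int)) := by
      rw [List.map_map]
      apply List.map_congr_left
      intro n _
      simp only [Function.comp_apply]; push_cast; ring
    by_cases h : pvIsSep c
    · simp only [PySem.List.enumerate_cons, List.filter_cons, h, if_pos, List.map_cons,
        pvIdxs, ih, hmap]
      simp
    · simp only [PySem.List.enumerate_cons, List.filter_cons, pvIdxs, h]
      simp [ih, hmap]

theorem pvIdxs_one (cs : List Char) :
    (match pvIdxs cs with
     | i :: _ => cs.take i
     | [] => cs) = pvF1 cs := by
  induction cs with
  | nil => simp [pvIdxs, pvF1]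
  | cons c cs ih =>
    by_cases h : pvIsSep c
    · simp [pvIdxs, h, pvF1]
    · simp only [pvIdxs, h, Bool.false_eq_true, if_false, pvF1]
      cases hi : pvIdxs cs with
      | nil => rw [hi] at ih; simpa using ih
      | cons i t => rw [hi] at ih; simpa using ih

theorem pvIdxs_two (cs : List Char) :
    (match pvIdxs cs with
     | _ :: i :: _ => cs.take i
     | _ => cs) = pvF2 cs := by
  induction cs with
  | nil => simp [pvIdxs, pvF2]
  | cons c cs ih =>
    have h1 := pvIdxs_one cs
    by_cases h : pvIsSep c
    · simp only [pvIdxs, h, if_pos, pvF2]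
      cases hi : pvIdxs cs with
      | nil => rw [hi] at h1; simp at h1 ⊢; exact h1
      | cons i t => rw [hi] at h1; simp at h1 ⊢; exact h1
    · simp only [pvIdxs, h, Bool.false_eq_true, if_false, pvF2]
      cases hi : pvIdxs cs with
      | nil => rw [hi] at ih; simpa using ih
      | cons i t =>
        cases t with
        | nil => rw [hi] at ih; simpa using ih
        | cons j t' => rw [hi] at ih; simpa using ih

theorem pvAlt_toList (in_id : String) :
    (get_spk_id2_from_id_alt in_id).toList = pvF2 in_id.toList := by
  unfold get_spk_id2_from_id_alt
  rw [pvEnumerate_filter in_id.toList 0]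
  rw [← pvIdxs_two in_id.toList]
  cases hi : pvIdxs in_id.toList with
  | nil => simp
  | cons i t =>
    cases t with
    | nil => simp
    | cons j t' =>
      have hz : ((0 : Int) + (j : Int)) = ((j : Nat) : Int) := by omega
      simp only [List.map_cons, hz, PySem.List.slice_to_natCast]
      simp

-- ===== VERDICT (by name: the statement is the Claim_ definition above) =====
theorem get_spk_id2_from_id_spec : Claim_equal_get_spk_id2_from_id := by
  intro in_id _
  unfold Spec_get_spk_id2_from_id
  apply String.toList_inj.mp
  rw [pvAlt_toList]
  have : get_spk_id2_from_id in_id = pvLoopA in_id.toList "" 0 := rfl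
  rw [this, pvLoopA_zero]
  simp
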